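-- pv_equiv track=rewrite | github.com/wojmichaluk/WDI-2022-2023 | extra/kolos_19-sam.py | czynnikowo_podobne
-- ===== SOURCE A (Python) =====
-- def czynnikowo_podobne(m,n):
--     p=m
--     d=2
--     wspolne=0
--     while p>1:
--         if p%d==0:
--             if n%d==0:
--                 wspolne+=1
--             while p%d==0:
--                 p//=d
--         d+=1
--         if wspolne>1:
--             break
--     return wspolne==1
-- ===== SOURCE B (Python) =====
-- def czynnikowo_podobne(m, n):
--     # Reduce to the gcd: the common prime factors of m and n are exactly the
--     # prime factors of gcd(m, |n|); count its distinct primes by trial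
--     # division up to sqrt and test whether there is exactly one.
--     if m <= 1:
--         return False
--     g = m
--     b = n if n >= 0 else -n
--     while b:
--         g, b = b, g % b
--     count = 0
--     d = 2
--     while d * d <= g:
--         if g % d == 0:
--             count += 1
--             while g % d == 0:
--                 g //= d
--         d += 1
--     if g > 1:
--         count += 1
--     return count == 1
-- ===== Notes on version B (the rewrite author's own statement) =====
-- stated objective: faster
-- what changed: B reduces the problem to g = gcd(m,|n|) via Euclid's algorithm and counts the distinct prime factors of g by trial division up to sqrt(g), instead of A's interleaved loop that trial-divides all of m up to its largest prime factor while testing each candidate factor against n.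
import Mathlib
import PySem

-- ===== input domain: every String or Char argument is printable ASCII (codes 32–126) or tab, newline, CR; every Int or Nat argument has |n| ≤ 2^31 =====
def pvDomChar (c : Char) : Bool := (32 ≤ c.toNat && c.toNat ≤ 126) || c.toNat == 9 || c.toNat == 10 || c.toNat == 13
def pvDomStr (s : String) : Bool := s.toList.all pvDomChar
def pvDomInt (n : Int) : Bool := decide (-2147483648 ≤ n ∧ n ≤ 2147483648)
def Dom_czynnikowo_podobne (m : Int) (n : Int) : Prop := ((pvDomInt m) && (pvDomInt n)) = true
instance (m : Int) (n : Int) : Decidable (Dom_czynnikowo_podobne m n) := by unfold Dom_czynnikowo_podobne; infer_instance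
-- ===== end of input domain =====

-- B computes gcd(m,|n|) by Euclid and counts its distinct prime factors by trial
-- division up to the square root, instead of A's loop trial-dividing all of m;
-- objective: faster (the loop bound drops from the largest prime factor of m to
-- log min(m,|n|) + sqrt(gcd(m,|n|))).

-- ===== PORT A =====
-- inner loop `while p % d == 0: p //= d` (fuel only makes the recursion structural;
-- p halves at least once per step, so fuel = p.toNat always suffices)
def pvStripA (fuel : Nat) (p : Int) (d : Int) : Int :=
  match fuel with
  | 0 => p
  | fuel + 1 =>
    if PySem.Int.mod p d = 0 then pvStripA fuel (PySem.Int.floordiv p d) d else p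

-- outer `while p > 1` loop of A, carrying (p, d, wspolne); the `break` returns wspolne == 1
def pvLoopA (fuel : Nat) (n : Int) (p : Int) (d : Int) (w : Int) : Bool :=
  match fuel with
  | 0 => decide (w = 1)
  | fuel + 1 =>
    if 1 < p then
      if PySem.Int.mod p d = 0 then
        let w' := if PySem.Int.mod n d = 0 then w + 1 else w
        let p' := pvStripA p.toNat p d
        if 1 < w' then decide (w' = 1) else pvLoopA fuel n p' (d + 1) w'
      else
        if 1 < w then decide (w = 1) else pvLoopA fuel n p (d + 1) w
    else decide (w = 1)

def czynnikowo_podobne (m : Int) (n : Int) : Bool :=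
  pvLoopA (2 * m.toNat + 2) n m 2 0

-- ===== PORT B =====
-- Euclid's loop `while b: g, b = b, g % b` (fuel: b strictly decreases)
def pvGcdB (fuel : Nat) (g : Int) (b : Int) : Int :=
  match fuel with
  | 0 => g
  | fuel + 1 => if b ≠ 0 then pvGcdB fuel b (PySem.Int.mod g b) else g

-- inner loop `while g % d == 0: g //= d` of B
def pvStripB (fuel : Nat) (g : Int) (d : Int) : Int :=
  match fuel with
  | 0 => g
  | fuel + 1 =>
    if PySem.Int.mod g d = 0 then pvStripB fuel (PySem.Int.floordiv g d) d else g

-- `while d * d <= g` trial-division loop of B, returning the final (g, count)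
def pvLoopB (fuel : Nat) (g : Int) (d : Int) (c : Int) : Int × Int :=
  match fuel with
  | 0 => (g, c)
  | fuel + 1 =>
    if d * d ≤ g then
      if PySem.Int.mod g d = 0 then
        pvLoopB fuel (pvStripB g.toNat g d) (d + 1) (c + 1)
      else pvLoopB fuel g (d + 1) c
    else (g, c)

def czynnikowo_podobne_alt (m : Int) (n : Int) : Bool :=
  if m ≤ 1 then false
  else
    let g0 := pvGcdB (n.natAbs + 1) m (if 0 ≤ n then n else -n)
    let r := pvLoopB (2 * g0.toNat + 2) g0 2 0
    let c := if 1 < r.1 then r.2 + 1 else r.2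
    decide (c = 1)

-- ===== PRECONDITION & SPEC =====
def Spec_czynnikowo_podobne (m : Int) (n : Int) (out : Bool) : Prop := out = czynnikowo_podobne_alt m n
instance (m : Int) (n : Int) (out : Bool) : Decidable (Spec_czynnikowo_podobne m n out) := by unfold Spec_czynnikowo_podobne; infer_instance

-- ===== CLAIM (what is proved, stated in full; the proofs are below) =====
def Claim_equal_czynnikowo_podobne : Prop := ∀ (m : Int) (n : Int), Dom_czynnikowo_podobne m n → Spec_czynnikowo_podobne m n (czynnikowo_podobne m n)

-- ===== LEMMAS AND PROOFS =====

-- a proper divisor is at most half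
theorem pv_two_mul_le {r p : Nat} (h : r ∣ p) (hne : r ≠ p) (hp : 1 ≤ p) : 2 * r ≤ p := by
  obtain ⟨k, rfl⟩ := h
  rcases Nat.lt_or_ge k 2 with hk | hk
  · interval_cases k <;> omega
  · have := Nat.mul_le_mul_left r hk
    omega

-- in trial division, the first divisor found is the least prime factor
theorem pv_d_prime {p d : Nat} (hp : 2 ≤ p) (hd : 2 ≤ d) (hdvd : d ∣ p)
    (hinv : ∀ q : Nat, Nat.Prime q → q ∣ p → d ≤ q) : Nat.Prime d := by
  have h1 : p.minFac ≤ d := Nat.minFac_le_of_dvd hd hdvd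
  have h2 : d ≤ p.minFac := hinv _ (Nat.minFac_prime (by omega)) (Nat.minFac_dvd p)
  have h3 : d = p.minFac := le_antisymm h2 h1
  exact h3 ▸ Nat.minFac_prime (by omega : p ≠ 1)

-- stripping the prime d removes exactly d from the prime-factor set
theorem pv_strip_primeFactors {p d r : Nat} (hp : 2 ≤ p) (hr1 : 1 ≤ r) (hr_nd : ¬ d ∣ r)
    (hr_iff : ∀ q : Nat, Nat.Prime q → q ≠ d → (q ∣ r ↔ q ∣ p)) :
    r.primeFactors = p.primeFactors.erase d := by
  ext q
  simp only [Nat.mem_primeFactors, Finset.mem_erase]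
  constructor
  · rintro ⟨hq, hqr, _⟩
    have hqd : q ≠ d := fun h => hr_nd (h ▸ hqr)
    exact ⟨hqd, hq, (hr_iff q hq hqd).mp hqr, by omega⟩
  · rintro ⟨hqd, hq, hqp, _⟩
    exact ⟨hq, (hr_iff q hq hqd).mpr hqp, by omega⟩

-- the trial-division invariant advances past d after d was stripped out
theorem pv_inv_step {p d r : Nat} (hinv : ∀ q : Nat, Nat.Prime q → q ∣ p → d ≤ q)
    (hr_dvd : r ∣ p) (hr_nd : ¬ d ∣ r) :
    ∀ q : Nat, Nat.Prime q → q ∣ r → d + 1 ≤ q := by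
  intro q hq hqr
  have h1 := hinv q hq (hqr.trans hr_dvd)
  have h2 : q ≠ d := fun h => hr_nd (h ▸ hqr)
  omega

-- counting a filtered set after erasing one member
theorem pv_card_filter_erase (s : Finset Nat) (P : Nat → Prop) [DecidablePred P] (d : Nat)
    (hd : d ∈ s) :
    ((s.erase d).filter P).card + (if P d then 1 else 0) = (s.filter P).card := by
  rw [Finset.filter_erase]
  by_cases h : P d
  · have hm : d ∈ s.filter P := Finset.mem_filter.mpr ⟨hd, h⟩
    have hpos : 0 < (s.filter P).card := Finset.card_pos.mpr ⟨d, hm⟩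
    rw [Finset.card_erase_of_mem hm]
    simp only [h, if_true]
    omega
  · have hm : d ∉ s.filter P := fun hm => h (Finset.mem_filter.mp hm).2
    rw [Finset.erase_eq_of_notMem hm]
    simp [h]

-- the strip loop divides out exactly the factor d: the result divides p, is not
-- divisible by d, and (for prime d) keeps every other prime factor
theorem pvStripA_spec (fuel : Nat) : ∀ (p d : Nat), 2 ≤ d → 1 ≤ p → p ≤ fuel →
    ∃ r : Nat, pvStripA fuel (p : Int) (d : Int) = (r : Int) ∧ 1 ≤ r ∧ r ∣ p ∧ ¬ d ∣ r ∧
      (Nat.Prime d → ∀ q : Nat, Nat.Prime q → q ≠ d → (q ∣ r ↔ q ∣ p)) := by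
  induction fuel with
  | zero => intro p d hd hp hpf; omega
  | succ f ih =>
    intro p d hd hp hpf
    have hmod : PySem.Int.mod (p : Int) (d : Int) = ((p % d : Nat) : Int) :=
      PySem.Int.mod_natCast p d
    by_cases hdvd : d ∣ p
    · have hmod0 : p % d = 0 := Nat.mod_eq_zero_of_dvd hdvd
      have hdle : d ≤ p := Nat.le_of_dvd (by omega) hdvd
      have hdiv : PySem.Int.floordiv (p : Int) (d : Int) = ((p / d : Nat) : Int) :=
        PySem.Int.floordiv_natCast p d
      obtain ⟨r, hr_eq, hr1, hr_dvd, hr_nd, hr_iff⟩ :=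
        ih (p / d) d hd (Nat.one_le_div_iff (by omega) |>.mpr hdle)
          (by have := Nat.div_lt_self (by omega : 0 < p) (by omega : 1 < d); omega)
      refine ⟨r, ?_, hr1, hr_dvd.trans (Nat.div_dvd_of_dvd hdvd), hr_nd, ?_⟩
      · have hc : PySem.Int.mod (p : Int) (d : Int) = 0 := by rw [hmod, hmod0]; rfl
        rw [pvStripA, if_pos hc, hdiv]
        exact hr_eq
      · intro hdp q hq hqd
        rw [hr_iff hdp q hq hqd]
        constructor
        · intro h; exact h.trans (Nat.div_dvd_of_dvd hdvd)
        · intro h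
          have hmul : d * (p / d) = p := Nat.mul_div_cancel' hdvd
          rcases (Nat.Prime.dvd_mul hq).mp (hmul ▸ h) with h' | h'
          · exact absurd ((Nat.prime_dvd_prime_iff_eq hq hdp).mp h') hqd
          · exact h'
    · have hmod0 : p % d ≠ 0 := fun h => hdvd (Nat.dvd_of_mod_eq_zero h)
      refine ⟨p, ?_, hp, dvd_rfl, hdvd, fun _ q _ _ => Iff.rfl⟩
      have hc : PySem.Int.mod (p : Int) (d : Int) ≠ 0 := by
        rw [hmod]; exact_mod_cast hmod0
      rw [pvStripA, if_neg hc]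

theorem pvStripB_eq (fuel : Nat) : ∀ (g d : Int), pvStripB fuel g d = pvStripA fuel g d := by
  induction fuel with
  | zero => intro g d; rfl
  | succ f ih => intro g d; rw [pvStripB, pvStripA]; split <;> simp [ih]

-- A's outer loop computes: wspolne + #\{distinct primes of p dividing n\} == 1
theorem pvLoopA_spec (fuel : Nat) : ∀ (p d : Nat) (w n : Int), 1 ≤ p → 2 ≤ d →
    0 ≤ w → w ≤ 1 → (∀ q : Nat, Nat.Prime q → q ∣ p → d ≤ q) → 2 * p < fuel + d →
    pvLoopA fuel n (p : Int) (d : Int) w =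
      decide (w + ((p.primeFactors.filter (fun q : Nat => (q : Int) ∣ n)).card : Int) = 1) := by
  induction fuel with
  | zero =>
    intro p d w n hp hd hw0 hw1 hinv hfuel
    have hp1 : p = 1 := by
      by_contra h
      have hq := Nat.minFac_prime (by omega : p ≠ 1)
      have h1 := hinv _ hq (Nat.minFac_dvd p)
      have h2 := Nat.minFac_le (by omega : 0 < p)
      omega
    subst hp1
    simp [pvLoopA, Nat.primeFactors_one]
  | succ f ih =>
    intro p d w n hp hd hw0 hw1 hinv hfuel
    by_cases hp1 : p = 1
    · subst hp1
      rw [pvLoopA]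
      norm_num [Nat.primeFactors_one]
    · have hp2 : 2 ≤ p := by omega
      have hplt : (1 : Int) < (p : Int) := by exact_mod_cast (by omega : (1:Nat) < p)
      rw [pvLoopA, if_pos hplt]
      have hmod : PySem.Int.mod (p : Int) (d : Int) = ((p % d : Nat) : Int) :=
        PySem.Int.mod_natCast p d
      by_cases hdvd : d ∣ p
      · have hm0 : p % d = 0 := Nat.mod_eq_zero_of_dvd hdvd
        have hc : PySem.Int.mod (p : Int) (d : Int) = 0 := by rw [hmod, hm0]; rfl
        rw [if_pos hc]
        have hdp : Nat.Prime d := pv_d_prime hp2 hd hdvd hinv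
        have hd_mem : d ∈ p.primeFactors := Nat.mem_primeFactors.mpr ⟨hdp, hdvd, by omega⟩
        have htn : ((p : Int)).toNat = p := Int.toNat_natCast p
        obtain ⟨r, hr_eq, hr1, hr_dvd, hr_nd, hr_iff⟩ := pvStripA_spec p p d hd hp le_rfl
        have hrP : r.primeFactors = p.primeFactors.erase d :=
          pv_strip_primeFactors hp2 hr1 hr_nd (hr_iff hdp)
        have hcard := pv_card_filter_erase p.primeFactors (fun q : Nat => (q : Int) ∣ n) d hd_mem
        have hrne : r ≠ p := fun h => hr_nd (h ▸ hdvd)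
        have h2r : 2 * r ≤ p := pv_two_mul_le hr_dvd hrne (by omega)
        have hinv' := pv_inv_step hinv hr_dvd hr_nd
        have hPiff : (PySem.Int.mod n (d : Int) = 0) ↔ ((d : Int) ∣ n) :=
          PySem.Int.mod_eq_zero_iff_dvd n (d : Int)
        by_cases hPd : ((d : Int) ∣ n)
        · have hc2 : PySem.Int.mod n (d : Int) = 0 := hPiff.mpr hPd
          simp only [hc2, if_true, htn, hr_eq]
          simp only [if_pos hPd] at hcard
          have hdF : d ∈ p.primeFactors.filter (fun q : Nat => (q : Int) ∣ n) :=
            Finset.mem_filter.mpr ⟨hd_mem, hPd⟩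
          have hcpos : 0 < (p.primeFactors.filter (fun q : Nat => (q : Int) ∣ n)).card :=
            Finset.card_pos.mpr ⟨d, hdF⟩
          by_cases hwbig : (1 : Int) < w + 1
          · rw [if_pos hwbig, decide_eq_decide]
            omega
          · rw [if_neg hwbig, ← Nat.cast_add_one,
              ih r (d + 1) (w + 1) n hr1 (by omega) (by omega) (by omega) hinv' (by omega),
              decide_eq_decide, hrP]
            omega
        · have hc2 : PySem.Int.mod n (d : Int) ≠ 0 := fun h => hPd (hPiff.mp h)
          simp only [hc2, if_false, htn, hr_eq]
          simp only [if_neg hPd] at hcard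
          have hwbig : ¬ (1 : Int) < w := by omega
          rw [if_neg hwbig, ← Nat.cast_add_one,
            ih r (d + 1) w n hr1 (by omega) (by omega) (by omega) hinv' (by omega),
            decide_eq_decide, hrP]
          omega
      · have hm0 : p % d ≠ 0 := fun h => hdvd (Nat.dvd_of_mod_eq_zero h)
        have hc : PySem.Int.mod (p : Int) (d : Int) ≠ 0 := by
          rw [hmod]; exact_mod_cast hm0
        rw [if_neg hc, if_neg (by omega : ¬ (1 : Int) < w), ← Nat.cast_add_one]
        have hinv' : ∀ q : Nat, Nat.Prime q → q ∣ p → d + 1 ≤ q := by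
          intro q hq hqp
          have h1 := hinv q hq hqp
          have h2 : q ≠ d := fun h => hdvd (h ▸ hqp)
          omega
        exact ih p (d + 1) w n hp (by omega) hw0 hw1 hinv' (by omega)

theorem pvGcdB_spec (fuel : Nat) : ∀ (g b : Nat), 1 ≤ g → b < fuel →
    pvGcdB fuel (g : Int) (b : Int) = (Nat.gcd b g : Int) := by
  induction fuel with
  | zero => intro g b _ h; omega
  | succ f ih =>
    intro g b hg hb
    by_cases hb0 : b = 0
    · subst hb0; rw [pvGcdB]; simp
    · rw [pvGcdB]
      have : ((b : Int) ≠ 0) := by exact_mod_cast hb0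
      simp only [this, if_true, ne_eq, not_false_iff]
      rw [PySem.Int.mod_natCast g b,
        ih b (g % b) (by omega) (by have := Nat.mod_lt g (y := b) (by omega); omega)]
      rw [Nat.gcd_rec b g]

-- B's trial-division loop: the final count plus (1 if the remainder exceeds 1)
-- is the number of distinct prime factors of g
theorem pvLoopB_spec (fuel : Nat) : ∀ (g d : Nat) (c : Int), 1 ≤ g → 2 ≤ d →
    (∀ q : Nat, Nat.Prime q → q ∣ g → d ≤ q) → 2 * g < fuel + d →
    ∃ (r : Nat) (rc : Int), pvLoopB fuel (g : Int) (d : Int) c = ((r : Int), rc) ∧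
      rc + (if 1 < r then (1 : Int) else 0) = c + (g.primeFactors.card : Int) := by
  induction fuel with
  | zero =>
    intro g d c hg hd hinv hfuel
    have hg1 : g = 1 := by
      by_contra h
      have hq := Nat.minFac_prime (by omega : g ≠ 1)
      have h1 := hinv _ hq (Nat.minFac_dvd g)
      have h2 := Nat.minFac_le (by omega : 0 < g)
      omega
    subst hg1
    exact ⟨1, c, by rw [pvLoopB], by simp [Nat.primeFactors_one]⟩
  | succ f ih =>
    intro g d c hg hd hinv hfuel
    by_cases hcond : d * d ≤ g
    · have hcondI : ((d : Int) * (d : Int) ≤ (g : Int)) := by exact_mod_cast hcond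
      rw [pvLoopB, if_pos hcondI]
      have hdd : d ≤ d * d := by nlinarith
      have hdg : d ≤ g := le_trans hdd hcond
      by_cases hdvd : d ∣ g
      · have hg2 : 2 ≤ g := by omega
        have hm0 : g % d = 0 := Nat.mod_eq_zero_of_dvd hdvd
        have hc : PySem.Int.mod (g : Int) (d : Int) = 0 := by
          rw [PySem.Int.mod_natCast, hm0]; rfl
        rw [if_pos hc]
        have hdp := pv_d_prime hg2 hd hdvd hinv
        have htn : ((g : Int)).toNat = g := Int.toNat_natCast g
        obtain ⟨r', hr_eq, hr1, hr_dvd, hr_nd, hr_iff⟩ := pvStripA_spec g g d hd (by omega) le_rfl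
        have hrP := pv_strip_primeFactors hg2 hr1 hr_nd (hr_iff hdp)
        have hd_mem : d ∈ g.primeFactors := Nat.mem_primeFactors.mpr ⟨hdp, hdvd, by omega⟩
        have hcard : r'.primeFactors.card = g.primeFactors.card - 1 := by
          rw [hrP]; exact Finset.card_erase_of_mem hd_mem
        have hcpos : 0 < g.primeFactors.card := Finset.card_pos.mpr ⟨d, hd_mem⟩
        have hrne : r' ≠ g := fun h => hr_nd (h ▸ hdvd)
        have h2r : 2 * r' ≤ g := pv_two_mul_le hr_dvd hrne (by omega)
        have hinv' := pv_inv_step hinv hr_dvd hr_nd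
        obtain ⟨r, rc, heq, hsum⟩ := ih r' (d + 1) (c + 1) hr1 (by omega) hinv' (by omega)
        refine ⟨r, rc, ?_, ?_⟩
        · rw [htn, pvStripB_eq, hr_eq, ← Nat.cast_add_one]; exact heq
        · by_cases h1r : 1 < r
          · simp only [h1r, if_true] at hsum ⊢; omega
          · simp only [h1r, if_false] at hsum ⊢; omega
      · have hm0 : g % d ≠ 0 := fun h => hdvd (Nat.dvd_of_mod_eq_zero h)
        have hc : PySem.Int.mod (g : Int) (d : Int) ≠ 0 := by
          rw [PySem.Int.mod_natCast]; exact_mod_cast hm0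
        rw [if_neg hc, ← Nat.cast_add_one]
        have hinv' : ∀ q : Nat, Nat.Prime q → q ∣ g → d + 1 ≤ q := by
          intro q hq hqg
          have h1 := hinv q hq hqg
          have h2 : q ≠ d := fun h => hdvd (h ▸ hqg)
          omega
        exact ih g (d + 1) c hg (by omega) hinv' (by omega)
    · have hcondI : ¬ ((d : Int) * (d : Int) ≤ (g : Int)) := by exact_mod_cast hcond
      rw [pvLoopB, if_neg hcondI]
      refine ⟨g, c, rfl, ?_⟩
      by_cases hg1 : g = 1
      · subst hg1; simp [Nat.primeFactors_one]
      · have hg2 : 2 ≤ g := by omega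
        have hprime : g.Prime := by
          by_contra h
          have h1 := Nat.minFac_sq_le_self (by omega : 0 < g) h
          have h2 := hinv _ (Nat.minFac_prime (by omega)) (Nat.minFac_dvd g)
          rw [pow_two] at h1
          have h3 : d * d ≤ g.minFac * g.minFac := Nat.mul_le_mul h2 h2
          omega
        rw [hprime.primeFactors]
        simp [show 1 < g by omega]

-- common prime factors of m and n are the prime factors of gcd(|n|, m)
theorem card_common_factors (m : Nat) (n : Int) (hm : 2 ≤ m) :
    (m.primeFactors.filter (fun q : Nat => (q : Int) ∣ n)).card =
      (Nat.gcd n.natAbs m).primeFactors.card := by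
  congr 1
  ext q
  have hpos : 0 < Nat.gcd n.natAbs m := Nat.gcd_pos_of_pos_right _ (by omega)
  simp only [Finset.mem_filter, Nat.mem_primeFactors, Nat.dvd_gcd_iff, Int.ofNat_dvd_left]
  constructor
  · rintro ⟨⟨hq, hqm, _⟩, hqn⟩
    exact ⟨hq, ⟨hqn, hqm⟩, by omega⟩
  · rintro ⟨hq, ⟨hqn, hqm⟩, _⟩
    exact ⟨⟨hq, hqm, by omega⟩, hqn⟩

-- ===== VERDICT (by name: the statement is the Claim_ definition above) =====
theorem czynnikowo_podobne_spec : Claim_equal_czynnikowo_podobne := by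
  intro m n _
  unfold Spec_czynnikowo_podobne czynnikowo_podobne czynnikowo_podobne_alt
  by_cases hm : m ≤ 1
  · rw [if_pos hm]
    have hlt : ¬ (1 : Int) < m := by omega
    rw [show 2 * m.toNat + 2 = (2 * m.toNat + 1) + 1 from rfl, pvLoopA, if_neg hlt]
    decide
  · rw [if_neg hm]
    have hm2 : (2 : Nat) ≤ m.toNat := by omega
    have hmc : ((m.toNat : Nat) : Int) = m := Int.toNat_of_nonneg (by omega)
    have hb : (if 0 ≤ n then n else -n) = ((n.natAbs : Nat) : Int) := by
      by_cases h : 0 ≤ n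
      · rw [if_pos h, Int.natAbs_of_nonneg h]
      · rw [if_neg h]; omega
    have hG1 : 1 ≤ Nat.gcd n.natAbs m.toNat := Nat.gcd_pos_of_pos_right _ (by omega)
    have hgcd : pvGcdB (n.natAbs + 1) m (if 0 ≤ n then n else -n) =
        ((Nat.gcd n.natAbs m.toNat : Nat) : Int) := by
      rw [hb]
      conv_lhs => rw [← hmc]
      exact pvGcdB_spec _ m.toNat n.natAbs (by omega) (by omega)
    obtain ⟨r, rc, heq, hsum⟩ := pvLoopB_spec (2 * Nat.gcd n.natAbs m.toNat + 2)
      (Nat.gcd n.natAbs m.toNat) 2 0 hG1 le_rfl (fun q hq _ => hq.two_le) (by omega)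
    rw [Nat.cast_ofNat] at heq
    have h := pvLoopA_spec (2 * m.toNat + 2) m.toNat 2 0 n (by omega) le_rfl (by norm_num)
      (by norm_num) (fun q hq _ => hq.two_le) (by omega)
    rw [Nat.cast_ofNat, hmc] at h
    simp only [hgcd, Int.toNat_natCast, heq]
    rw [h, decide_eq_decide]
    have hcc := card_common_factors m.toNat n hm2
    by_cases h1r : 1 < r
    · rw [if_pos (by exact_mod_cast h1r : (1 : Int) < (r : Int))]
      simp only [h1r, if_true] at hsum
      omega
    · rw [if_neg (by exact_mod_cast h1r : ¬ (1 : Int) < (r : Int))]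
      simp only [h1r, if_false] at hsum
      omega
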